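-- pv_equiv track=rewrite | github.com/jlsknd/AOIS | lab1/Classes/bcd_converter.py | _bcd_to_digit
-- ===== SOURCE A (Python) =====
-- def _bcd_to_digit(bcd_bits):
--     """Преобразование 4-битного BCD в цифру"""
--     result = 0
--     power = 1
--     for i in range(3, -1, -1):
--         if bcd_bits[i] == 1:
--             result += power
--         power *= 2
--     return result
-- ===== SOURCE B (Python) =====
-- def _bcd_to_digit(bcd_bits):
--     """Преобразование 4-битного BCD в цифру"""
--     s = ''.join('1' if bcd_bits[i] == 1 else '0' for i in range(4))
--     return int(s, 2)
-- ===== Notes on version B (the rewrite author's own statement) =====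
-- stated objective: idiomatic
-- what changed: Replaces the reversed-index weighted-power accumulation loop with building a 4-character binary string ('1' exactly where the bit equals 1) and parsing it with int(s, 2).
import Mathlib
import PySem

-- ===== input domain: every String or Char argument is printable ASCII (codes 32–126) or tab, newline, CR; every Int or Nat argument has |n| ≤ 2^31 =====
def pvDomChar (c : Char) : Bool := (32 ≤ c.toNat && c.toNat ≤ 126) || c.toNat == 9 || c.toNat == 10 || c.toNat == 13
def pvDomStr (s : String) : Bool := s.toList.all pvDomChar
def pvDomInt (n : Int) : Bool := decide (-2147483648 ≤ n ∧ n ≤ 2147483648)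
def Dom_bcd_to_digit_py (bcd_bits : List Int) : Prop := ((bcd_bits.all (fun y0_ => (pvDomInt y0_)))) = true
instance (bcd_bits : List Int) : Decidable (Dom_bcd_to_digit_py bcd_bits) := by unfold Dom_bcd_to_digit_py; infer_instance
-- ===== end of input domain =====

-- B builds a 4-char binary string and parses it base 2 instead of A's weighted-power loop (idiomatic, same cost).

-- ===== PORT A =====
-- result/power accumulation over i = 3, 2, 1, 0; pyGetD's default 0 is only reachable
-- outside Pre_ (Python raises IndexError there).
def bcd_to_digit_py (bcd_bits : List Int) : Int :=
  let st := (PySem.List.pyRange 3 (-1) (-1)).foldl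
    (fun (st : Int × Int) i =>
      let result := if PySem.List.pyGetD bcd_bits i 0 = 1 then st.1 + st.2 else st.1
      (result, st.2 * 2)) (0, 1)
  st.1

-- ===== PORT B =====
-- ''.join('1' if bcd_bits[i] == 1 else '0' for i in range(4)); pyGetD's default 0 only outside Pre_.
def pvJoinBits (bcd_bits : List Int) : List Char :=
  (PySem.List.pyRange 0 4 1).map (fun i => if PySem.List.pyGetD bcd_bits i 0 = 1 then '1' else '0')

-- int(s, 2): exact base-2 parse for strings consisting only of '0'/'1' (which pvJoinBits produces)
def pvParseBin (cs : List Char) : Int :=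
  cs.foldl (fun acc c => 2 * acc + (if c = '1' then 1 else 0)) 0

def bcd_to_digit_py_alt (bcd_bits : List Int) : Int :=
  pvParseBin (pvJoinBits bcd_bits)

-- ===== PRECONDITION & SPEC =====
-- Pre_: Python A (and B) raise IndexError when the list has fewer than 4 elements.
def Pre_bcd_to_digit_py (bcd_bits : List Int) : Prop := 4 ≤ bcd_bits.length
instance (bcd_bits : List Int) : Decidable (Pre_bcd_to_digit_py bcd_bits) := by unfold Pre_bcd_to_digit_py; infer_instance
def pvWitness_bcd_to_digit_py : List Int := [1, 0, 0, 1]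

def Spec_bcd_to_digit_py (bcd_bits : List Int) (out : Int) : Prop := out = bcd_to_digit_py_alt bcd_bits
instance (bcd_bits : List Int) (out : Int) : Decidable (Spec_bcd_to_digit_py bcd_bits out) := by unfold Spec_bcd_to_digit_py; infer_instance

-- ===== CLAIM (what is proved, stated in full; the proofs are below) =====
def Claim_equal_bcd_to_digit_py : Prop := ∀ (bcd_bits : List Int), Dom_bcd_to_digit_py bcd_bits → Pre_bcd_to_digit_py bcd_bits → Spec_bcd_to_digit_py bcd_bits (bcd_to_digit_py bcd_bits)

-- ===== LEMMAS AND PROOFS =====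

-- ===== VERDICT (by name: the statement is the Claim_ definition above) =====
theorem bcd_to_digit_py_spec : Claim_equal_bcd_to_digit_py := by
  intro bcd_bits _ hpre
  unfold Pre_bcd_to_digit_py at hpre
  rcases bcd_bits with _ | ⟨a, _ | ⟨b, _ | ⟨c, _ | ⟨d, t⟩⟩⟩⟩ <;> simp at hpre
  simp only [Spec_bcd_to_digit_py, bcd_to_digit_py, bcd_to_digit_py_alt, pvJoinBits, pvParseBin]
  rw [show PySem.List.pyRange 3 (-1) (-1) = [3, 2, 1, 0] from by decide,
      show PySem.List.pyRange 0 4 1 = [0, 1, 2, 3] from by decide]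
  simp only [List.map_cons, List.map_nil, List.foldl_cons, List.foldl_nil,
    PySem.List.pyGetD_ofNat', List.getD_cons_succ, List.getD_cons_zero]
  have hch : ∀ (p : Prop) (_ : Decidable p), ((if p then '1' else '0') = '1') ↔ p := by
    intro p hp; by_cases h : p <;> simp [h]
  simp only [hch]
  split_ifs <;> ring
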